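-- pv_equiv track=rewrite | github.com/busterswt/vibeview | draino/web/resource_helpers.py | _search_score
-- ===== SOURCE A (Python) =====
-- def _search_score(query: str, fields: list[object]) -> int:
--     needle = str(query or "").strip().lower()
--     if not needle:
--         return 0
--     best = 0
--     for raw in fields:
--         value = str(raw or "").strip().lower()
--         if not value:
--             continue
--         if value == needle:
--             best = max(best, 120)
--         elif value.startswith(needle):
--             best = max(best, 95)
--         elif any(part.startswith(needle) for part in value.replace("/", " ").replace(":", " ").replace(".", " ").replace("-", " ").replace("_", " ").split()):
--             best = max(best, 82)
--         elif needle in value: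
--             best = max(best, 70)
--     return best
-- ===== SOURCE B (Python) =====
-- def _has_word_start(value: str, needle: str) -> bool:
--     cleaned = value.replace("/", " ").replace(":", " ").replace(".", " ").replace("-", " ").replace("_", " ")
--     return any(part.startswith(needle) for part in cleaned.split())
--
-- def _search_score(query: str, fields: list[object]) -> int:
--     needle = str(query or "").strip().lower()
--     if not needle:
--         return 0
--     values = [v for v in (str(raw or "").strip().lower() for raw in fields) if v]
--     if any(v == needle for v in values):
--         return 120
--     if any(v.startswith(needle) for v in values):
--         return 95
--     if any(_has_word_start(v, needle) for v in values):
--         return 82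
--     if any(needle in v for v in values):
--         return 70
--     return 0
-- ===== Notes on version B (the rewrite author's own statement) =====
-- stated objective: simpler
-- what changed: Replaces the per-field elif-cascade with a running max accumulator by materializing the cleaned non-empty values once and scanning them in descending score priority with early-return any() passes.
import Mathlib
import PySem

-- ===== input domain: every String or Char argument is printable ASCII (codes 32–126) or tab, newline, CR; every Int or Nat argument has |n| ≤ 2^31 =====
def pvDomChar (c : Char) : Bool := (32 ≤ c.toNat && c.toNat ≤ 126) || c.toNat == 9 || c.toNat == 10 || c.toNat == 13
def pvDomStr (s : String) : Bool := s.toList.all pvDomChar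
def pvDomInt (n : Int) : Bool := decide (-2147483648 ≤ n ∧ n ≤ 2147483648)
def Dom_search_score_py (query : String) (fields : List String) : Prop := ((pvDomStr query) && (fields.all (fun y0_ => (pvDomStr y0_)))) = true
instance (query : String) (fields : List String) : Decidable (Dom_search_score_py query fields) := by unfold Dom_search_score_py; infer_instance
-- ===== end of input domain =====

-- B replaces A's per-field elif-cascade + running max by one cleaned-values pass and
-- priority-ordered any() scans (simpler decomposition; same asymptotic cost).

-- ===== PORT A =====
-- the body of A's `for raw in fields:` loop (best is the accumulator)
def pvLoopBodyA (needle : String) (best : Int) (raw : String) : Int :=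
  let value := PySem.Str.lower (PySem.Str.strip raw)
  if value = "" then best
  else if value = needle then max best 120
  else if PySem.Str.startswith value needle then max best 95
  else if (PySem.Str.split₀ (PySem.Str.replace (PySem.Str.replace (PySem.Str.replace
            (PySem.Str.replace (PySem.Str.replace value "/" " ") ":" " ") "." " ")
            "-" " ") "_" " ")).any (fun part => PySem.Str.startswith part needle) then max best 82
  else if PySem.Str.isIn needle value then max best 70
  else best

def search_score_py (query : String) (fields : List String) : Int :=
  let needle := PySem.Str.lower (PySem.Str.strip query)
  if needle = "" then 0
  else fields.foldl (pvLoopBodyA needle) 0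

-- ===== PORT B =====
-- str(raw or "").strip().lower()
def pvClean (s : String) : String := PySem.Str.lower (PySem.Str.strip s)

-- value.replace("/"," ")…replace("_"," ").split() has a part starting with needle
def pvHasWordStart (value needle : String) : Bool :=
  (PySem.Str.split₀ (PySem.Str.replace (PySem.Str.replace (PySem.Str.replace
    (PySem.Str.replace (PySem.Str.replace value "/" " ") ":" " ") "." " ")
    "-" " ") "_" " ")).any (fun part => PySem.Str.startswith part needle)

def search_score_py_alt (query : String) (fields : List String) : Int :=
  let needle := pvClean query
  if needle = "" then 0
  else
    let values := (fields.map (fun raw => pvClean raw)).filter (fun v => !(v == ""))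
    if values.any (fun v => v == needle) then 120
    else if values.any (fun v => PySem.Str.startswith v needle) then 95
    else if values.any (fun v => pvHasWordStart v needle) then 82
    else if values.any (fun v => PySem.Str.isIn needle v) then 70
    else 0

-- ===== PRECONDITION & SPEC =====
def Spec_search_score_py (query : String) (fields : List String) (out : Int) : Prop := out = search_score_py_alt query fields
instance (query : String) (fields : List String) (out : Int) : Decidable (Spec_search_score_py query fields out) := by unfold Spec_search_score_py; infer_instance

-- ===== CLAIM (what is proved, stated in full; the proofs are below) =====
def Claim_equal_search_score_py : Prop := ∀ (query : String) (fields : List String), Dom_search_score_py query fields → Spec_search_score_py query fields (search_score_py query fields)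

-- ===== LEMMAS AND PROOFS =====

-- per-field score of A's elif cascade (proof helper)
def pvScore (needle v : String) : Int :=
  if v = needle then 120
  else if PySem.Str.startswith v needle then 95
  else if pvHasWordStart v needle then 82
  else if PySem.Str.isIn needle v then 70
  else 0

theorem pvScore_le (needle v : String) : pvScore needle v ≤ 120 := by
  unfold pvScore; split_ifs <;> omega

theorem pvLoopBodyA_eq (needle raw : String) (b : Int) (hb : 0 ≤ b) :
    pvLoopBodyA needle b raw
    = if pvClean raw = "" then b else max b (pvScore needle (pvClean raw)) := by
  unfold pvLoopBodyA pvScore pvClean pvHasWordStart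
  dsimp only
  split_ifs <;> omega

-- A's loop over fields equals a max-of-scores fold over B's cleaned, non-empty values
theorem pvFold_eq (needle : String) : ∀ (fields : List String) (b : Int), 0 ≤ b →
    fields.foldl (pvLoopBodyA needle) b
    = ((fields.map (fun raw => pvClean raw)).filter (fun v => !(v == ""))).foldl
        (fun best v => max best (pvScore needle v)) b := by
  intro fields
  induction fields with
  | nil => intro b _; simp
  | cons raw rest ih =>
    intro b hb
    simp only [List.foldl_cons, List.map_cons, List.filter_cons]
    rw [pvLoopBodyA_eq needle raw b hb]
    by_cases h : pvClean raw = ""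
    · rw [if_pos h, if_neg (by simp [h] : ¬ ((!(pvClean raw == "")) = true))]
      exact ih b hb
    · rw [if_neg h, if_pos (by simp [h] : (!(pvClean raw == "")) = true), List.foldl_cons]
      exact ih _ (le_trans hb (le_max_left _ _))

-- the max of per-field scores equals B's priority-ordered any() scans
theorem pvTier_eq (needle : String) (values : List String) :
    values.foldl (fun best v => max best (pvScore needle v)) 0
    = (if values.any (fun v => v == needle) then (120 : Int)
       else if values.any (fun v => PySem.Str.startswith v needle) then 95
       else if values.any (fun v => pvHasWordStart v needle) then 82
       else if values.any (fun v => PySem.Str.isIn needle v) then 70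
       else 0) := by
  have hmap : values.foldl (fun best v => max best (pvScore needle v)) 0
      = (values.map (pvScore needle)).foldl max 0 := (List.foldl_map).symm
  rw [hmap]
  have hmem := PySem.List.foldl_max_mem (values.map (pvScore needle)) 0
  have hle := PySem.List.le_foldl_max (values.map (pvScore needle)) 0
  have hub : ∀ (k : Int), (∀ v ∈ values, pvScore needle v ≤ k) → 0 ≤ k →
      (values.map (pvScore needle)).foldl max 0 ≤ k := by
    intro k hk h0
    rcases hmem with h | h
    · omega
    · rcases List.mem_map.mp h with ⟨v, hv, hvN⟩
      rw [← hvN]; exact hk v hv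
  have hlb : ∀ v ∈ values, pvScore needle v ≤ (values.map (pvScore needle)).foldl max 0 := by
    intro v hv
    exact hle.2 _ (List.mem_map.mpr ⟨v, hv, rfl⟩)
  by_cases h1 : values.any (fun v => v == needle) = true
  · rw [if_pos h1]
    rcases List.any_eq_true.mp h1 with ⟨v, hv, hveq⟩
    have heq : v = needle := by simpa using hveq
    have hs : pvScore needle v = 120 := by
      unfold pvScore; rw [if_pos heq]
    have h120 := hlb v hv
    have := hub 120 (fun v _ => pvScore_le needle v) (by omega)
    omega
  · have h1' : ∀ v ∈ values, ¬ (v = needle) := by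
      intro v hv hc
      exact h1 (List.any_eq_true.mpr ⟨v, hv, by simp [hc]⟩)
    rw [if_neg h1]
    by_cases h2 : values.any (fun v => PySem.Str.startswith v needle) = true
    · rw [if_pos h2]
      rcases List.any_eq_true.mp h2 with ⟨v, hv, hvsw⟩
      have hs : pvScore needle v = 95 := by
        unfold pvScore; rw [if_neg (h1' v hv), if_pos hvsw]
      have hk : ∀ v ∈ values, pvScore needle v ≤ 95 := by
        intro v hv
        unfold pvScore; rw [if_neg (h1' v hv)]; split_ifs <;> omega
      have h95 := hlb v hv
      have := hub 95 hk (by omega)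
      omega
    · have h2' : ∀ v ∈ values, ¬ (PySem.Str.startswith v needle = true) := by
        intro v hv hc
        exact h2 (List.any_eq_true.mpr ⟨v, hv, hc⟩)
      rw [if_neg h2]
      by_cases h3 : values.any (fun v => pvHasWordStart v needle) = true
      · rw [if_pos h3]
        rcases List.any_eq_true.mp h3 with ⟨v, hv, hvw⟩
        have hs : pvScore needle v = 82 := by
          unfold pvScore
          rw [if_neg (h1' v hv), if_neg (h2' v hv), if_pos hvw]
        have hk : ∀ v ∈ values, pvScore needle v ≤ 82 := by
          intro v hv
          unfold pvScore
          rw [if_neg (h1' v hv), if_neg (h2' v hv)]; split_ifs <;> omega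
        have h82 := hlb v hv
        have := hub 82 hk (by omega)
        omega
      · have h3' : ∀ v ∈ values, ¬ (pvHasWordStart v needle = true) := by
          intro v hv hc
          exact h3 (List.any_eq_true.mpr ⟨v, hv, hc⟩)
        rw [if_neg h3]
        by_cases h4 : values.any (fun v => PySem.Str.isIn needle v) = true
        · rw [if_pos h4]
          rcases List.any_eq_true.mp h4 with ⟨v, hv, hvi⟩
          have hs : pvScore needle v = 70 := by
            unfold pvScore
            rw [if_neg (h1' v hv), if_neg (h2' v hv), if_neg (h3' v hv), if_pos hvi]
          have hk : ∀ v ∈ values, pvScore needle v ≤ 70 := by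
            intro v hv
            unfold pvScore
            rw [if_neg (h1' v hv), if_neg (h2' v hv), if_neg (h3' v hv)]
            split_ifs <;> omega
          have h70 := hlb v hv
          have := hub 70 hk (by omega)
          omega
        · have h4' : ∀ v ∈ values, ¬ (PySem.Str.isIn needle v = true) := by
            intro v hv hc
            exact h4 (List.any_eq_true.mpr ⟨v, hv, hc⟩)
          rw [if_neg h4]
          have hk : ∀ v ∈ values, pvScore needle v ≤ 0 := by
            intro v hv
            unfold pvScore
            rw [if_neg (h1' v hv), if_neg (h2' v hv), if_neg (h3' v hv), if_neg (h4' v hv)]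
          have := hub 0 hk le_rfl
          omega

-- ===== VERDICT (by name: the statement is the Claim_ definition above) =====
theorem search_score_py_spec : Claim_equal_search_score_py := by
  intro query fields _
  unfold Spec_search_score_py search_score_py search_score_py_alt
  by_cases h : pvClean query = ""
  · have h' : PySem.Str.lower (PySem.Str.strip query) = "" := h
    rw [if_pos h', if_pos h]
  · have h' : ¬ (PySem.Str.lower (PySem.Str.strip query) = "") := h
    rw [if_neg h', if_neg h]
    exact (pvFold_eq (PySem.Str.lower (PySem.Str.strip query)) fields 0 le_rfl).trans
      (pvTier_eq (PySem.Str.lower (PySem.Str.strip query)) _)
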